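-- pv_equiv track=rewrite | github.com/Jitender-Singh870/Solitaire-using-TKinter | main.py | _find_suit_in_tokens
-- ===== SOURCE A (Python) =====
-- _SUITE_WORD = {"D": "diamonds", "C": "clubs", "H": "hearts", "S": "spades"}
--
-- def _levenshtein(a: str, b: str) -> int:
--     # small/edit-distance optimized for short tokens
--     if a == b:
--         return 0
--     la, lb = len(a), len(b)
--     if la == 0:
--         return lb
--     if lb == 0:
--         return la
--     # initialize row
--     prev = list(range(lb + 1))
--     for i, ca in enumerate(a, 1):
--         cur = [i] + [0] * lb
--         for j, cb in enumerate(b, 1):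
--             add = 0 if ca == cb else 1
--             cur[j] = min(prev[j] + 1, cur[j - 1] + 1, prev[j - 1] + add)
--         prev = cur
--     return prev[-1]
--
-- def _find_suit_in_tokens(tokens):
--     # return suit letter or None
--     for t in tokens:
--         for s, word in _SUITE_WORD.items():
--             if word in t:
--                 return s
--             # allow small typo tolerance
--             if _levenshtein(t, word) <= 1:
--                 return s
--     return None
-- ===== SOURCE B (Python) =====
-- _SUITE_WORD = {"D": "diamonds", "C": "clubs", "H": "hearts", "S": "spades"}
--
-- def _within_one(a, b):
--     # edit distance <= 1, decided directly (no DP table)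
--     if a == b:
--         return True
--     la, lb = len(a), len(b)
--     if abs(la - lb) > 1:
--         return False
--     if la == lb:
--         return sum(1 for x, y in zip(a, b) if x != y) <= 1
--     if la < lb:
--         a, b = b, a  # make a the longer string
--     i = 0
--     while i < len(b) and a[i] == b[i]:
--         i += 1
--     return a[i + 1:] == b[i:]
--
-- def _find_suit_in_tokens(tokens):
--     # return suit letter or None
--     for t in tokens:
--         for s, word in _SUITE_WORD.items():
--             if word in t or _within_one(t, word):
--                 return s
--     return None
-- ===== Notes on version B (the rewrite author's own statement) =====
-- stated objective: faster
-- what changed: Replaces the full Levenshtein dynamic-programming table by a direct one-edit-distance predicate: equality, or a length gap > 1 fails immediately, or equal lengths with at most one mismatching position, or lengths differing by one with the longer string matching after skipping the first mismatch.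
import Mathlib
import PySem

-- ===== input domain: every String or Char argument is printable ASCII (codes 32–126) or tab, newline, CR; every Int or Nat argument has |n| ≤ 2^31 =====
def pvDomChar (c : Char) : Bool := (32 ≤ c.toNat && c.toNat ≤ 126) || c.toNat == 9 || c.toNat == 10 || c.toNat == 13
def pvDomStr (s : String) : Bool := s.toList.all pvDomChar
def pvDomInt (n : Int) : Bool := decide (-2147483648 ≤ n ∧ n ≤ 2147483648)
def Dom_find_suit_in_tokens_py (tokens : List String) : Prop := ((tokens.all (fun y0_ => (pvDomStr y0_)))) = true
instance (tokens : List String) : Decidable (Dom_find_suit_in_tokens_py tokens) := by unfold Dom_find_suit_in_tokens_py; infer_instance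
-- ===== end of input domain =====

-- B replaces A's full Levenshtein DP table by a direct one-edit-distance predicate (equality / one substitution / one insertion-deletion); simpler and cheaper per token.

-- ===== PORT A =====
-- _SUITE_WORD = {"D": "diamonds", "C": "clubs", "H": "hearts", "S": "spades"} (dict, iterated in insertion order)
def pvSuiteWord : List (String × String) := [("D", "diamonds"), ("C", "clubs"), ("H", "hearts"), ("S", "spades")]

-- inner 'for j, cb in enumerate(b, 1): cur[j] = min(prev[j]+1, cur[j-1]+1, prev[j-1]+add)'
-- (bs = remaining chars of b, pj::ps = prev[j:], diag = prev[j-1], left = cur[j-1]; builds cur[1:])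
def pvLevRow (ca : Char) : List Char → List Nat → Nat → Nat → List Nat
  | cb :: bs, pj :: ps, diag, left =>
      let add := if ca = cb then 0 else 1
      let cj := min (pj + 1) (min (left + 1) (diag + add))
      cj :: pvLevRow ca bs ps pj cj
  | _, _, _, _ => []

-- outer 'for i, ca in enumerate(a, 1): cur = [i] + ...; prev = cur'
def pvLevLoop (b : List Char) : List Char → Nat → List Nat → List Nat
  | [], _, prev => prev
  | ca :: as_, i, prev =>
      match prev with
      | diag :: rest => pvLevLoop b as_ (i + 1) (i :: pvLevRow ca b rest diag i)
      | [] => []  -- unreachable: prev always has length b.length + 1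

-- def _levenshtein(a, b)
def pvLevenshtein (a b : String) : Nat :=
  if a = b then 0
  else if a.toList.length = 0 then b.toList.length
  else if b.toList.length = 0 then a.toList.length
  else (pvLevLoop b.toList a.toList 1 (List.range (b.toList.length + 1))).getLastD 0  -- prev[-1]

-- inner 'for s, word in _SUITE_WORD.items(): ...'
def pvInnerA (t : String) : List (String × String) → Option String
  | [] => none
  | (s, word) :: rest =>
      if PySem.Str.isIn word t then some s
      else if pvLevenshtein t word ≤ 1 then some s
      else pvInnerA t rest

def find_suit_in_tokens_py (tokens : List String) : Option String :=
  match tokens with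
  | [] => none
  | t :: ts =>
      match pvInnerA t pvSuiteWord with
      | some s => some s
      | none => find_suit_in_tokens_py ts

-- ===== PORT B =====
-- 'while i < len(b) and a[i] == b[i]: i += 1; return a[i+1:] == b[i:]' (a one char longer than b)
def pvOneDel : List Char → List Char → Bool
  | a, [] => (a.drop 1).isEmpty
  | [], _ :: _ => false
  | x :: xs, y :: ys => if x = y then pvOneDel xs ys else decide (xs = y :: ys)

-- def _within_one(a, b)
def pvWithinOne (a b : String) : Bool :=
  if a = b then true
  else if ((a.toList.length : Int) - (b.toList.length : Int)).natAbs > 1 then false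
  else if a.toList.length = b.toList.length then
    decide (List.countP (fun p => p.1 != p.2) (a.toList.zip b.toList) ≤ 1)
  else if a.toList.length < b.toList.length then pvOneDel b.toList a.toList  -- a, b = b, a
  else pvOneDel a.toList b.toList

def pvInnerB (t : String) : List (String × String) → Option String
  | [] => none
  | (s, word) :: rest =>
      if PySem.Str.isIn word t || pvWithinOne t word then some s
      else pvInnerB t rest

def find_suit_in_tokens_py_alt (tokens : List String) : Option String :=
  match tokens with
  | [] => none
  | t :: ts =>
      match pvInnerB t pvSuiteWord with
      | some s => some s
      | none => find_suit_in_tokens_py_alt ts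

-- ===== PRECONDITION & SPEC =====
def Spec_find_suit_in_tokens_py (tokens : List String) (out : Option String) : Prop := out = find_suit_in_tokens_py_alt tokens
instance (tokens : List String) (out : Option String) : Decidable (Spec_find_suit_in_tokens_py tokens out) := by unfold Spec_find_suit_in_tokens_py; infer_instance

-- ===== CLAIM (what is proved, stated in full; the proofs are below) =====
def Claim_equal_find_suit_in_tokens_py : Prop := ∀ (tokens : List String), Dom_find_suit_in_tokens_py tokens → Spec_find_suit_in_tokens_py tokens (find_suit_in_tokens_py tokens)

-- ===== LEMMAS AND PROOFS =====

-- textbook edit distance by structural recursion (proof-side spec of A's DP)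
def pvEd : List Char → List Char → Nat
  | [], b => b.length
  | a, [] => a.length
  | x :: xs, y :: ys =>
      min (pvEd xs (y :: ys) + 1) (min (pvEd (x :: xs) ys + 1) (pvEd xs ys + (if x = y then 0 else 1)))

lemma pvEd_nil_right : ∀ a : List Char, pvEd a [] = a.length := by
  intro a; cases a <;> simp [pvEd]

-- row tail spec: entries cur[1:] of the DP row; r = reversed consumed prefix of a, rb = reversed consumed prefix of b, bs = rest of b
def pvRowT (r : List Char) : List Char → List Char → List Nat
  | _, [] => []
  | rb, cb :: bs => pvEd r (cb :: rb) :: pvRowT r (cb :: rb) bs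

lemma pvLevRow_spec (ca : Char) (r : List Char) :
    ∀ (bs rb : List Char),
      pvLevRow ca bs (pvRowT r rb bs) (pvEd r rb) (pvEd (ca :: r) rb) = pvRowT (ca :: r) rb bs := by
  intro bs
  induction bs with
  | nil => intro rb; rfl
  | cons cb bs ih =>
      intro rb
      have hc : min (pvEd r (cb :: rb) + 1)
          (min (pvEd (ca :: r) rb + 1) (pvEd r rb + (if ca = cb then 0 else 1)))
          = pvEd (ca :: r) (cb :: rb) := by rw [pvEd]
      simp only [pvRowT, pvLevRow, hc, ih (cb :: rb)]

lemma pvLevLoop_spec (b : List Char) :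
    ∀ (as_ r : List Char),
      pvLevLoop b as_ (r.length + 1) (r.length :: pvRowT r [] b)
        = (as_.reverse ++ r).length :: pvRowT (as_.reverse ++ r) [] b := by
  intro as_
  induction as_ with
  | nil => intro r; simp [pvLevLoop]
  | cons ca as ih =>
      intro r
      have hrow := pvLevRow_spec ca r b []
      rw [pvEd_nil_right, pvEd_nil_right] at hrow
      simp only [List.length_cons] at hrow
      have := ih (ca :: r)
      simp only [List.length_cons] at this
      simp only [pvLevLoop, hrow, this]
      simp

lemma pvRange_eq_row : ∀ (bs rb : List Char),
    (rb.length : Nat) :: pvRowT [] rb bs = List.range' rb.length (bs.length + 1) := by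
  intro bs
  induction bs with
  | nil => intro rb; simp [pvRowT, List.range'_succ]
  | cons cb bs ih =>
      intro rb
      have h := ih (cb :: rb)
      simp only [List.length_cons] at h
      simp only [pvRowT, List.length_cons]
      rw [List.range'_succ, ← h]
      simp [pvEd]

lemma pvRow_getLast (r : List Char) :
    ∀ (bs rb : List Char) (d : Nat),
      (pvEd r rb :: pvRowT r rb bs).getLastD d = pvEd r (bs.reverse ++ rb) := by
  intro bs
  induction bs with
  | nil => intro rb d; rfl
  | cons cb bs ih =>
      intro rb d
      simp only [pvRowT, List.getLastD_cons, ih (cb :: rb)]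
      simp

lemma pvEd_self : ∀ a : List Char, pvEd a a = 0 := by
  intro a
  induction a with
  | nil => simp [pvEd]
  | cons x xs ih => simp [pvEd, ih]


lemma pvLev_eq_ed_rev (a b : String) :
    pvLevenshtein a b = pvEd a.toList.reverse b.toList.reverse := by
  unfold pvLevenshtein
  split_ifs with h1 h2 h3
  · subst h1; rw [pvEd_self]
  · rw [List.length_eq_zero_iff] at h2
    rw [h2]
    simp [pvEd]
  · rw [List.length_eq_zero_iff] at h3
    rw [h3]
    simp [pvEd_nil_right]
  · have hr : List.range (b.toList.length + 1) = 0 :: pvRowT [] [] b.toList := by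
      rw [List.range_eq_range']
      have := pvRange_eq_row b.toList ([] : List Char)
      simpa using this.symm
    rw [hr]
    have hloop := pvLevLoop_spec b.toList a.toList []
    simp only [List.length_nil, List.append_nil] at hloop
    rw [show (0 : Nat) + 1 = 1 from rfl] at hloop
    rw [hloop]
    have hlast := pvRow_getLast a.toList.reverse b.toList ([] : List Char) 0
    rw [pvEd_nil_right] at hlast
    simpa using hlast

-- the one-edit relation: equal, one substitution, or one deletion (either way)
def pvRsub (a b : List Char) : Prop := ∃ p s x y, a = p ++ x :: s ∧ b = p ++ y :: s
def pvRdel (a b : List Char) : Prop := ∃ p s x, a = p ++ x :: s ∧ b = p ++ s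
def pvR (a b : List Char) : Prop := a = b ∨ pvRsub a b ∨ pvRdel a b ∨ pvRdel b a

lemma pvRsub_length {a b : List Char} (h : pvRsub a b) : a.length = b.length := by
  obtain ⟨p, s, x, y, h1, h2⟩ := h; subst h1; subst h2; simp

lemma pvRdel_length {a b : List Char} (h : pvRdel a b) : a.length = b.length + 1 := by
  obtain ⟨p, s, x, h1, h2⟩ := h; subst h1; subst h2; simp [List.length_append]; omega

lemma pvRsub_cons_iff (c : Char) (u v : List Char) :
    pvRsub (c :: u) (c :: v) ↔ (u = v ∨ pvRsub u v) := by
  constructor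
  · rintro ⟨p, s, x, y, h1, h2⟩
    cases p with
    | nil =>
        simp only [List.nil_append, List.cons.injEq] at h1 h2
        left; rw [h1.2, h2.2]
    | cons q p' =>
        simp only [List.cons_append, List.cons.injEq] at h1 h2
        right; exact ⟨p', s, x, y, h1.2, h2.2⟩
  · rintro (h | ⟨p, s, x, y, h1, h2⟩)
    · exact ⟨[], u, c, c, by simp, by simp [h]⟩
    · exact ⟨c :: p, s, x, y, by simp [h1], by simp [h2]⟩

lemma pvRsub_cons_ne_iff {x y : Char} (hxy : x ≠ y) (u v : List Char) :
    pvRsub (x :: u) (y :: v) ↔ u = v := by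
  constructor
  · rintro ⟨p, s, x', y', h1, h2⟩
    cases p with
    | nil =>
        simp only [List.nil_append, List.cons.injEq] at h1 h2
        rw [h1.2, h2.2]
    | cons q p' =>
        simp only [List.cons_append, List.cons.injEq] at h1 h2
        exact absurd (h1.1.trans h2.1.symm) hxy
  · intro h; exact ⟨[], u, x, y, by simp, by simp [h]⟩

lemma pvRdel_cons_iff (c : Char) (u v : List Char) :
    pvRdel (c :: u) (c :: v) ↔ pvRdel u v := by
  constructor
  · rintro ⟨p, s, x, h1, h2⟩
    cases p with
    | nil =>
        simp only [List.nil_append, List.cons.injEq] at h1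
        simp only [List.nil_append] at h2
        exact ⟨[], v, c, by rw [h1.2, ← h2]; simp, by simp⟩
    | cons q p' =>
        simp only [List.cons_append, List.cons.injEq] at h1 h2
        exact ⟨p', s, x, h1.2, h2.2⟩
  · rintro ⟨p, s, x, h1, h2⟩
    exact ⟨c :: p, s, x, by simp [h1], by simp [h2]⟩

lemma pvRdel_cons_ne_iff {x y : Char} (hxy : x ≠ y) (u v : List Char) :
    pvRdel (x :: u) (y :: v) ↔ u = y :: v := by
  constructor
  · rintro ⟨p, s, x', h1, h2⟩
    cases p with
    | nil =>
        simp only [List.nil_append, List.cons.injEq] at h1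
        simp only [List.nil_append] at h2
        rw [h1.2, ← h2]
    | cons q p' =>
        simp only [List.cons_append, List.cons.injEq] at h1 h2
        exact absurd (h1.1.trans h2.1.symm) hxy
  · intro h; exact ⟨[], y :: v, x, by simp [h], by simp⟩

lemma pvR_cons (c : Char) {u v : List Char} (h : pvR u v) : pvR (c :: u) (c :: v) := by
  rcases h with h | h | h | h
  · left; rw [h]
  · right; left; exact (pvRsub_cons_iff c u v).mpr (Or.inr h)
  · right; right; left; exact (pvRdel_cons_iff c u v).mpr h
  · right; right; right; exact (pvRdel_cons_iff c v u).mpr h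

lemma pvEd_eq_zero_iff : ∀ a b : List Char, pvEd a b = 0 ↔ a = b := by
  intro a
  induction a with
  | nil =>
      intro b; cases b <;> simp [pvEd]
  | cons x xs ih =>
      intro b
      cases b with
      | nil => simp [pvEd_nil_right]
      | cons y ys =>
          rw [pvEd]
          simp only [Nat.min_eq_zero_iff, Nat.add_eq_zero_iff, List.cons.injEq]
          constructor
          · rintro (⟨_, h⟩ | ⟨_, h⟩ | ⟨h0, hadd⟩)
            · omega
            · omega
            · refine ⟨?_, (ih ys).mp h0⟩
              by_contra hxy; simp [hxy] at hadd
          · rintro ⟨hxy, hs⟩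
            right; right
            exact ⟨(ih ys).mpr hs, by simp [hxy]⟩

lemma pvEd_cons_cons_le (c : Char) (u v : List Char) : pvEd (c :: u) (c :: v) ≤ pvEd u v := by
  rw [pvEd]
  exact le_trans (min_le_right _ _) (le_trans (min_le_right _ _) (by simp))

lemma pvEd_append_le (p u v : List Char) : pvEd (p ++ u) (p ++ v) ≤ pvEd u v := by
  induction p with
  | nil => simp
  | cons c p ih => exact le_trans (pvEd_cons_cons_le c _ _) ih

lemma pvEd_sub_le (x y : Char) (s : List Char) : pvEd (x :: s) (y :: s) ≤ 1 := by
  rw [pvEd]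
  refine le_trans (min_le_right _ _) (le_trans (min_le_right _ _) ?_)
  rw [pvEd_self]
  split_ifs <;> simp

lemma pvEd_del_le (x : Char) (s : List Char) : pvEd (x :: s) s ≤ 1 := by
  cases s with
  | nil => simp [pvEd_nil_right]
  | cons y ys =>
      rw [pvEd]
      refine le_trans (min_le_left _ _) ?_
      rw [pvEd_self]

lemma pvEd_ins_le (y : Char) (s : List Char) : pvEd s (y :: s) ≤ 1 := by
  cases s with
  | nil => simp [pvEd]
  | cons z zs =>
      rw [pvEd]
      refine le_trans (min_le_right _ _) (le_trans (min_le_left _ _) ?_)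
      rw [pvEd_self]

lemma pvR_ed_le {a b : List Char} (h : pvR a b) : pvEd a b ≤ 1 := by
  rcases h with h | ⟨p, s, x, y, h1, h2⟩ | ⟨p, s, x, h1, h2⟩ | ⟨p, s, x, h1, h2⟩
  · rw [h, pvEd_self]; omega
  · subst h1; subst h2; exact le_trans (pvEd_append_le p _ _) (pvEd_sub_le x y s)
  · subst h1; subst h2; exact le_trans (pvEd_append_le p _ _) (pvEd_del_le x s)
  · subst h1; subst h2; exact le_trans (pvEd_append_le p _ _) (pvEd_ins_le x s)

lemma pvEd_le_one_iff : ∀ a b : List Char, pvEd a b ≤ 1 ↔ pvR a b := by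
  intro a b
  refine ⟨?_, pvR_ed_le⟩
  induction a generalizing b with
  | nil =>
      intro h
      cases b with
      | nil => left; rfl
      | cons y ys =>
          cases ys with
          | nil => right; right; right; exact ⟨[], [], y, by simp, by simp⟩
          | cons z zs => simp [pvEd] at h
  | cons x xs ih =>
      intro h
      cases b with
      | nil =>
          rw [pvEd_nil_right] at h
          simp only [List.length_cons] at h
          have : xs = [] := by
            cases xs with | nil => rfl | cons _ _ => simp at h
          subst this
          right; right; left; exact ⟨[], [], x, by simp, by simp⟩
      | cons y ys =>
          rw [pvEd] at h
          rcases min_le_iff.mp h with hA | hmin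
          · have h0 : pvEd xs (y :: ys) = 0 := by omega
            have := (pvEd_eq_zero_iff _ _).mp h0
            right; right; left; exact ⟨[], y :: ys, x, by rw [this]; simp, by simp⟩
          · rcases min_le_iff.mp hmin with hB | hC
            · have h0 : pvEd (x :: xs) ys = 0 := by omega
              have := (pvEd_eq_zero_iff _ _).mp h0
              right; right; right; exact ⟨[], x :: xs, y, by rw [this]; simp, by simp⟩
            · by_cases hxy : x = y
              · subst hxy
                simp only [if_true] at hC
                exact pvR_cons x (ih ys (by omega))
              · rw [if_neg hxy] at hC
                have h0 : pvEd xs ys = 0 := by omega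
                have := (pvEd_eq_zero_iff _ _).mp h0
                right; left; exact ⟨[], ys, x, y, by rw [this]; simp, by simp⟩

lemma pvR_rev {a b : List Char} (h : pvR a b) : pvR a.reverse b.reverse := by
  rcases h with h | ⟨p, s, x, y, h1, h2⟩ | ⟨p, s, x, h1, h2⟩ | ⟨p, s, x, h1, h2⟩
  · left; rw [h]
  · right; left
    exact ⟨s.reverse, p.reverse, x, y, by rw [h1]; simp, by rw [h2]; simp⟩
  · right; right; left
    exact ⟨s.reverse, p.reverse, x, by rw [h1]; simp, by rw [h2]; simp⟩
  · right; right; right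
    exact ⟨s.reverse, p.reverse, x, by rw [h1]; simp, by rw [h2]; simp⟩

lemma pvR_rev_iff (a b : List Char) : pvR a.reverse b.reverse ↔ pvR a b := by
  constructor
  · intro h; simpa using pvR_rev h
  · exact pvR_rev

lemma pvOneDel_iff : ∀ (b a : List Char), a.length = b.length + 1 →
    (pvOneDel a b = true ↔ pvRdel a b) := by
  intro b
  induction b with
  | nil =>
      intro a h
      match a, h with
      | [x], _ =>
          simp only [pvOneDel, List.drop_succ_cons, List.drop_nil, List.isEmpty_nil]
          constructor
          · intro _; exact ⟨[], [], x, by simp, by simp⟩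
          · intro _; trivial
  | cons y ys ih =>
      intro a h
      match a with
      | x :: xs =>
          simp only [List.length_cons] at h
          by_cases hxy : x = y
          · subst hxy
            rw [show pvOneDel (x :: xs) (x :: ys) = pvOneDel xs ys by simp [pvOneDel]]
            rw [pvRdel_cons_iff]
            exact ih xs (by omega)
          · rw [show pvOneDel (x :: xs) (y :: ys) = decide (xs = y :: ys) by simp [pvOneDel, hxy]]
            rw [pvRdel_cons_ne_iff hxy]
            simp

lemma pvCnt_eq_zero : ∀ a b : List Char, a.length = b.length →
    (List.countP (fun p => p.1 != p.2) (a.zip b) = 0 ↔ a = b) := by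
  intro a
  induction a with
  | nil =>
      intro b h
      have : b = [] := by cases b with | nil => rfl | cons _ _ => simp at h
      subst this; simp
  | cons x xs ih =>
      intro b h
      cases b with
      | nil => simp at h
      | cons y ys =>
          simp only [List.length_cons] at h
          simp only [List.zip_cons_cons, List.countP_cons, bne_iff_ne, ne_eq,
            Nat.add_eq_zero_iff, List.cons.injEq]
          rw [ih ys (by omega)]
          constructor
          · rintro ⟨hs, hx⟩
            refine ⟨?_, hs⟩
            by_contra hxy; simp [hxy] at hx
          · rintro ⟨hx, hs⟩; exact ⟨hs, by simp [hx]⟩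

lemma pvCnt_le_one_iff : ∀ a b : List Char, a.length = b.length →
    (List.countP (fun p => p.1 != p.2) (a.zip b) ≤ 1 ↔ (a = b ∨ pvRsub a b)) := by
  intro a
  induction a with
  | nil =>
      intro b h
      have : b = [] := by cases b with | nil => rfl | cons _ _ => simp at h
      subst this; simp
  | cons x xs ih =>
      intro b h
      cases b with
      | nil => simp at h
      | cons y ys =>
          simp only [List.length_cons] at h
          rw [List.zip_cons_cons, List.countP_cons]
          by_cases hxy : x = y
          · subst hxy
            rw [if_neg (by simp), Nat.add_zero, ih ys (by omega)]
            simp only [List.cons.injEq, true_and, pvRsub_cons_iff]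
            tauto
          · rw [if_pos (by simp [hxy])]
            rw [show List.countP (fun p => p.1 != p.2) (xs.zip ys) + 1 ≤ 1 ↔
                List.countP (fun p => p.1 != p.2) (xs.zip ys) = 0 from by omega]
            rw [pvCnt_eq_zero xs ys (by omega)]
            simp only [List.cons.injEq, hxy, false_and, false_or, pvRsub_cons_ne_iff hxy]

lemma pvWithinOne_iff (a b : String) : pvWithinOne a b = true ↔ pvLevenshtein a b ≤ 1 := by
  rw [pvLev_eq_ed_rev, pvEd_le_one_iff, pvR_rev_iff]
  unfold pvWithinOne
  split_ifs with h1 h2 h3 h4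
  · simp only [true_iff]
    left; rw [h1]
  · simp only [false_iff]
    rintro (h | h | h | h)
    · exact h1 (String.ext_iff.mpr h)
    · have := pvRsub_length h; omega
    · have := pvRdel_length h; omega
    · have := pvRdel_length h; omega
  · rw [decide_eq_true_iff, pvCnt_le_one_iff _ _ h3]
    constructor
    · rintro (h | h)
      · left; exact h
      · right; left; exact h
    · rintro (h | h | h | h)
      · left; exact h
      · right; exact h
      · have := pvRdel_length h; omega
      · have := pvRdel_length h; omega
  · have hlen : b.toList.length = a.toList.length + 1 := by omega
    rw [pvOneDel_iff a.toList b.toList hlen]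
    constructor
    · intro h; right; right; right; exact h
    · rintro (h | h | h | h)
      · rw [h] at h4; omega
      · have := pvRsub_length h; omega
      · have := pvRdel_length h; omega
      · exact h
  · have hlen : a.toList.length = b.toList.length + 1 := by omega
    rw [pvOneDel_iff b.toList a.toList hlen]
    constructor
    · intro h; right; right; left; exact h
    · rintro (h | h | h | h)
      · rw [h] at hlen; omega
      · have := pvRsub_length h; omega
      · exact h
      · have := pvRdel_length h; omega

lemma pvInner_eq (t : String) : ∀ l : List (String × String), pvInnerA t l = pvInnerB t l := by
  intro l
  induction l with
  | nil => rfl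
  | cons hd rest ih =>
      obtain ⟨s, word⟩ := hd
      simp only [pvInnerA, pvInnerB]
      by_cases hin : PySem.Chars.isIn word.toList t.toList = true
      · simp [hin]
      · by_cases hl : pvLevenshtein t word ≤ 1
        · have hw : pvWithinOne t word = true := (pvWithinOne_iff t word).mpr hl
          simp [hin, hl, hw]
        · have hw : pvWithinOne t word = false := by
            rw [Bool.eq_false_iff]
            intro hc; exact hl ((pvWithinOne_iff t word).mp hc)
          simp [hin, hl, hw, ih]

lemma pvMain_eq : ∀ tokens : List String, find_suit_in_tokens_py tokens = find_suit_in_tokens_py_alt tokens := by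
  intro tokens
  induction tokens with
  | nil => rfl
  | cons t ts ih =>
      simp only [find_suit_in_tokens_py, find_suit_in_tokens_py_alt, pvInner_eq, ih]

-- ===== VERDICT (by name: the statement is the Claim_ definition above) =====
theorem find_suit_in_tokens_py_spec : Claim_equal_find_suit_in_tokens_py := by
  unfold Claim_equal_find_suit_in_tokens_py
  intro tokens _
  exact pvMain_eq tokens
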